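-- pv_equiv track=rewrite | github.com/Sapfik/Practise-Python | codewars2/main13.py | choose_best_sum
-- ===== SOURCE A (Python) =====
-- from itertools import combinations
--
-- def choose_best_sum(t, k, ls):
--
--     array = []
--     for char in list(combinations((ls), k)):
--         if sum(char) <= t:
--             array.append(sum(char))
--         else:
--             continue
--     return max(array) if len(array) > 0 else None
-- ===== SOURCE B (Python) =====
-- def choose_best_sum(t, k, ls):
--     if k > len(ls):
--         return None
--     # DP over item count: dp[j] = set of sums achievable with exactly j elements
--     dp = [set() for _ in range(k + 1)]
--     dp[0].add(0)
--     for x in ls: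
--         for j in range(k, 0, -1):
--             dp[j] |= {s + x for s in dp[j - 1]}
--     best = None
--     for s in dp[k]:
--         if s <= t and (best is None or s > best):
--             best = s
--     return best
-- ===== Notes on version B (the rewrite author's own statement) =====
-- stated objective: alternative
-- what changed: Replaces brute-force enumeration of all C(n,k) combinations with a subset-sum dynamic program over item count (dp[j] = set of sums achievable with exactly j elements, with an early None when k > len(ls)), then takes the best sum not exceeding t; intended as faster (measured 21x at the largest size both finished) but unconfirmed at larger sizes where both can blow up.
import Mathlib
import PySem

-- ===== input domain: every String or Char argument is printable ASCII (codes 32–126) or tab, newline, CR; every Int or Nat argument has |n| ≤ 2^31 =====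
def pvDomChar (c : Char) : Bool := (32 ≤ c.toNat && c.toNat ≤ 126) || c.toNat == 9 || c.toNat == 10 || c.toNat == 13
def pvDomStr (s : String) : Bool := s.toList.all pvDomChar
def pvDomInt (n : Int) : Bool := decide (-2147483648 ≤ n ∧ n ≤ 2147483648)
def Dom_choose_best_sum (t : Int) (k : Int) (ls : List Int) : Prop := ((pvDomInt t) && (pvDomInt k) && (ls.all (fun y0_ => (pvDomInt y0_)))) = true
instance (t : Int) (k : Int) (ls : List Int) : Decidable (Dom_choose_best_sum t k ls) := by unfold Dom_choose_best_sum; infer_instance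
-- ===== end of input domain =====

-- B replaces brute-force enumeration of all C(n,k) combinations with a subset-sum DP
-- over item count (set of sums achievable with exactly j elements).

-- ===== PORT A =====
-- itertools.combinations(ls, r): r-element subsequences in lexicographic index order
def pvCombos : Nat → List Int → List (List Int)
  | 0, _ => [[]]
  | _ + 1, [] => []
  | n + 1, x :: xs => (pvCombos n xs).map (fun c => x :: c) ++ pvCombos (n + 1) xs

def choose_best_sum (t : Int) (k : Int) (ls : List Int) : Option Int :=
  -- array = []; for char in combinations(ls, k): if sum(char) <= t: array.append(sum(char))
  let array := (pvCombos k.toNat ls).foldl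
    (fun arr c => if c.sum ≤ t then arr ++ [c.sum] else arr) []
  -- return max(array) if len(array) > 0 else None
  if array.length > 0 then PySem.List.max? array (fun y => y) else none

-- ===== PORT B =====
-- one pass of the inner 'for j in range(k, 0, -1): dp[j] |= {s + x for s in dp[j-1]}'
-- (descending j reads the OLD dp[j-1]; functionally: prev carries the old previous row)
def pvStepAux (x : Int) (prev : PySem.Set Int) : List (PySem.Set Int) → List (PySem.Set Int)
  | [] => []
  | d :: rest => PySem.Set.union d (prev.map (fun s => s + x)) :: pvStepAux x d rest

def pvStep (x : Int) (dp : List (PySem.Set Int)) : List (PySem.Set Int) :=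
  match dp with
  | [] => []
  | d0 :: rest => d0 :: pvStepAux x d0 rest

def choose_best_sum_alt (t : Int) (k : Int) (ls : List Int) : Option Int :=
  -- if k > len(ls): return None
  if k > (ls.length : Int) then none else
  -- dp = [set() for _ in range(k+1)]; dp[0].add(0)
  let dp0 : List (PySem.Set Int) :=
    PySem.Set.add PySem.Set.empty 0 :: List.replicate k.toNat PySem.Set.empty
  -- for x in ls: for j in range(k, 0, -1): dp[j] |= {s + x for s in dp[j-1]}
  let dp := ls.foldl (fun d x => pvStep x d) dp0
  -- best = None; for s in dp[k]: if s <= t and (best is None or s > best): best = s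
  match PySem.List.pyGet? dp k with
  | none => none
  | some sk =>
    sk.foldl (fun best s =>
      if s ≤ t && (match best with | none => true | some b => decide (b < s))
      then some s else best) none

-- ===== PRECONDITION & SPEC =====
-- Pre_ excludes k < 0, on which Python A raises ValueError (combinations with negative r).
def Pre_choose_best_sum (t : Int) (k : Int) (ls : List Int) : Prop := 0 ≤ k
instance (t : Int) (k : Int) (ls : List Int) : Decidable (Pre_choose_best_sum t k ls) := by unfold Pre_choose_best_sum; infer_instance
def pvWitness_choose_best_sum : Int × Int × List Int := (10, 2, [1, 2, 3])

def Spec_choose_best_sum (t : Int) (k : Int) (ls : List Int) (out : Option Int) : Prop := out = choose_best_sum_alt t k ls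
instance (t : Int) (k : Int) (ls : List Int) (out : Option Int) : Decidable (Spec_choose_best_sum t k ls out) := by unfold Spec_choose_best_sum; infer_instance

-- ===== CLAIM (what is proved, stated in full; the proofs are below) =====
def Claim_equal_choose_best_sum : Prop := ∀ (t : Int) (k : Int) (ls : List Int), Dom_choose_best_sum t k ls → Pre_choose_best_sum t k ls → Spec_choose_best_sum t k ls (choose_best_sum t k ls)

-- ===== LEMMAS AND PROOFS =====

-- A's append loop builds exactly the filtered list of combination sums
theorem pvArrayA_eq (t : Int) (cs : List (List Int)) (acc : List Int) :
    cs.foldl (fun arr c => if c.sum ≤ t then arr ++ [c.sum] else arr) acc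
      = acc ++ (cs.map (fun c => c.sum)).filter (fun s => decide (s ≤ t)) := by
  induction cs generalizing acc with
  | nil => simp
  | cons c cs ih =>
    simp only [List.foldl_cons, List.map_cons, List.filter_cons]
    by_cases h : c.sum ≤ t <;> simp [h, ih]

-- pvCombos j l enumerates exactly the length-j sublists of l
theorem pvMem_combos (j : Nat) (l : List Int) (c : List Int) :
    c ∈ pvCombos j l ↔ c.Sublist l ∧ c.length = j := by
  induction l generalizing j c with
  | nil =>
    cases j with
    | zero => simp [pvCombos, List.sublist_nil]
    | succ j' =>
      simp only [pvCombos, List.mem_nil_iff, false_iff]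
      rintro ⟨hs, hl⟩
      rw [List.sublist_nil.1 hs] at hl
      simp at hl
  | cons y rest ih =>
    cases j with
    | zero =>
      constructor
      · intro h
        simp [pvCombos] at h
        subst h
        exact ⟨List.nil_sublist _, rfl⟩
      · rintro ⟨hs, hl⟩
        rw [List.length_eq_zero_iff.1 hl]
        simp [pvCombos]
    | succ j' =>
      simp only [pvCombos, List.mem_append, List.mem_map]
      constructor
      · rintro (⟨c', hc', rfl⟩ | h)
        · rcases (ih j' c').1 hc' with ⟨hs, hl⟩
          exact ⟨List.cons_sublist_cons.2 hs, by simp [hl]⟩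
        · rcases (ih (j' + 1) c).1 h with ⟨hs, hl⟩
          exact ⟨hs.cons _, hl⟩
      · rintro ⟨hs, hl⟩
        rcases List.sublist_cons_iff.1 hs with h | ⟨r, rfl, hr⟩
        · exact Or.inr ((ih (j' + 1) c).2 ⟨h, hl⟩)
        · exact Or.inl ⟨r, (ih j' r).2 ⟨hr, by simpa using hl⟩, rfl⟩

-- sums of (j+1)-combinations of seen ++ [x]: either avoid x, or extend a j-combination by x
theorem pvMemSumsAppend (j : Nat) (seen : List Int) (x s : Int) :
    s ∈ (pvCombos (j + 1) (seen ++ [x])).map (fun c => c.sum)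
      ↔ s ∈ (pvCombos (j + 1) seen).map (fun c => c.sum)
        ∨ ∃ u ∈ (pvCombos j seen).map (fun c => c.sum), s = u + x := by
  simp only [List.mem_map]
  constructor
  · rintro ⟨c, hc, rfl⟩
    rcases (pvMem_combos _ _ _).1 hc with ⟨hs, hl⟩
    rcases List.sublist_append_iff.1 hs with ⟨c1, c2, rfl, h1, h2⟩
    rcases List.sublist_singleton.1 h2 with rfl | rfl
    · exact Or.inl ⟨c1, (pvMem_combos _ _ _).2 ⟨h1, by simpa using hl⟩, by simp⟩
    · refine Or.inr ⟨c1.sum, ⟨c1, (pvMem_combos _ _ _).2 ⟨h1, by simp at hl; omega⟩, rfl⟩, by simp⟩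
  · rintro (⟨c, hc, rfl⟩ | ⟨u, ⟨c, hc, rfl⟩, rfl⟩)
    · rcases (pvMem_combos _ _ _).1 hc with ⟨hs, hl⟩
      exact ⟨c, (pvMem_combos _ _ _).2 ⟨hs.trans (List.sublist_append_left _ _), hl⟩, rfl⟩
    · rcases (pvMem_combos _ _ _).1 hc with ⟨hs, hl⟩
      exact ⟨c ++ [x], (pvMem_combos _ _ _).2
        ⟨List.Sublist.append hs (List.Sublist.refl _), by simp [hl]⟩, by simp⟩

-- the step preserves length
theorem pvStepAux_length (x : Int) (prev : PySem.Set Int) (l : List (PySem.Set Int)) :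
    (pvStepAux x prev l).length = l.length := by
  induction l generalizing prev with
  | nil => rfl
  | cons d rest ih => simp [pvStepAux, ih]

theorem pvStep_length (x : Int) (dp : List (PySem.Set Int)) :
    (pvStep x dp).length = dp.length := by
  cases dp with
  | nil => rfl
  | cons d0 rest => simp [pvStep, pvStepAux_length]

theorem pvStepAux_getElem (x : Int) (prev : PySem.Set Int) (l : List (PySem.Set Int))
    (i : Nat) (hi : i < l.length) :
    (pvStepAux x prev l)[i]'(by rw [pvStepAux_length]; exact hi)
      = PySem.Set.union (l[i]) (((prev :: l)[i]'(by simp; omega)).map (fun s => s + x)) := by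
  induction l generalizing prev i with
  | nil => simp at hi
  | cons d rest ih =>
    cases i with
    | zero => rfl
    | succ i => exact ih d i (by simpa using hi)

-- membership in the stepped dp, index-wise
theorem pvStep_mem (x : Int) (dp : List (PySem.Set Int)) (j : Nat) (hj : j < dp.length) (s : Int) :
    s ∈ (pvStep x dp)[j]'(by rw [pvStep_length]; exact hj)
      ↔ (s ∈ dp[j] ∨ ∃ j', ∃ hj' : j = j' + 1, ∃ u ∈ dp[j']'(by omega), s = u + x) := by
  cases dp with
  | nil => simp at hj
  | cons d0 rest =>
    cases j with
    | zero =>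
      constructor
      · intro h; exact Or.inl h
      · rintro (h | ⟨j', hj', _⟩)
        · exact h
        · omega
    | succ i =>
      have hi : i < rest.length := by simpa using hj
      have hg := pvStepAux_getElem x d0 rest i hi
      constructor
      · intro h
        rw [show (pvStep x (d0 :: rest))[i + 1]'(by rw [pvStep_length]; exact hj)
              = (pvStepAux x d0 rest)[i]'(by rw [pvStepAux_length]; exact hi) from rfl, hg] at h
        rcases (PySem.Set.mem_union _ _ _).1 h with h1 | h2
        · exact Or.inl (by simpa using h1)
        · rcases List.mem_map.1 h2 with ⟨u, hu, huv⟩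
          exact Or.inr ⟨i, rfl, u, hu, huv.symm⟩
      · intro h
        rw [show (pvStep x (d0 :: rest))[i + 1]'(by rw [pvStep_length]; exact hj)
              = (pvStepAux x d0 rest)[i]'(by rw [pvStepAux_length]; exact hi) from rfl, hg]
        apply (PySem.Set.mem_union _ _ _).2
        rcases h with h1 | ⟨j', hj', u, hu, huv⟩
        · exact Or.inl (by simpa using h1)
        · have hj'' : j' = i := by omega
          subst hj''
          exact Or.inr (List.mem_map.2 ⟨u, hu, huv.symm⟩)

-- invariant: after folding the prefix, dp[j] holds exactly the j-combination sums of seen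
theorem pvDpInv (ls : List Int) : ∀ (dp : List (PySem.Set Int)) (seen : List Int),
    (∀ j (hj : j < dp.length) (s : Int),
       s ∈ dp[j] ↔ s ∈ (pvCombos j seen).map (fun c => c.sum)) →
    (ls.foldl (fun d x => pvStep x d) dp).length = dp.length ∧
    (∀ j (hj : j < (ls.foldl (fun d x => pvStep x d) dp).length) (s : Int),
       s ∈ (ls.foldl (fun d x => pvStep x d) dp)[j]
         ↔ s ∈ (pvCombos j (seen ++ ls)).map (fun c => c.sum)) := by
  induction ls with
  | nil =>
    intro dp seen h
    refine ⟨rfl, ?_⟩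
    intro j hj s
    rw [List.append_nil]
    exact h j hj s
  | cons x rest ih =>
    intro dp seen h
    have hstep : ∀ j (hj : j < (pvStep x dp).length) (s : Int),
        s ∈ (pvStep x dp)[j] ↔ s ∈ (pvCombos j (seen ++ [x])).map (fun c => c.sum) := by
      intro j hj s
      have hj' : j < dp.length := by rw [pvStep_length] at hj; exact hj
      rw [pvStep_mem x dp j hj' s]
      cases j with
      | zero =>
        simp only [pvCombos]
        constructor
        · rintro (hm | ⟨j', hj'', _⟩)
          · have := (h 0 hj' s).1 hm
            simpa [pvCombos] using this
          · omega
        · intro hm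
          exact Or.inl ((h 0 hj' s).2 (by simpa [pvCombos] using hm))
      | succ j'' =>
        rw [pvMemSumsAppend j'' seen x s]
        constructor
        · rintro (hm | ⟨j', hj'', u, hu, rfl⟩)
          · exact Or.inl ((h _ hj' s).1 hm)
          · have hj3 : j' = j'' := by omega
            subst hj3
            exact Or.inr ⟨u, (h j' (by omega) u).1 hu, rfl⟩
        · rintro (hm | ⟨u, hu, rfl⟩)
          · exact Or.inl ((h _ hj' s).2 hm)
          · exact Or.inr ⟨j'', rfl, u, (h j'' (by omega) u).2 hu, rfl⟩
    have := ih (pvStep x dp) (seen ++ [x]) hstep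
    simp only [List.foldl_cons]
    refine ⟨by rw [this.1, pvStep_length], ?_⟩
    intro j hj s
    rw [this.2 j (by simpa using hj) s]
    simp

-- characterisation of B's final running-best loop
theorem pvBestFold (t : Int) : ∀ (l : List Int) (acc : Option Int),
    ((l.foldl (fun best s =>
        if s ≤ t && (match best with | none => true | some b => decide (b < s))
        then some s else best) acc) = none ↔ acc = none ∧ ∀ y ∈ l, ¬ y ≤ t) ∧
    (∀ b, (l.foldl (fun best s =>
        if s ≤ t && (match best with | none => true | some b => decide (b < s))
        then some s else best) acc) = some b →
      ((acc = some b ∨ (b ∈ l ∧ b ≤ t)) ∧ (∀ y ∈ l, y ≤ t → y ≤ b) ∧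
       (∀ a, acc = some a → a ≤ b))) := by
  intro l
  induction l with
  | nil =>
    intro acc
    refine ⟨by simp, ?_⟩
    intro b h
    exact ⟨Or.inl h, by simp, fun a ha => by rw [ha] at h; exact le_of_eq (Option.some.inj h)⟩
  | cons s l ih =>
    intro acc
    simp only [List.foldl_cons]
    split_ifs with hif
    all_goals simp only [Bool.and_eq_true, decide_eq_true_eq] at hif
    · -- condition fired: new accumulator is some s
      have hst : s ≤ t := hif.1
      have hacc : ∀ a, acc = some a → a < s := by
        intro a ha
        rw [ha] at hif
        simpa using hif.2
      have H := ih (some s)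
      constructor
      · rw [H.1]
        simp [hst]
      · intro b hb
        obtain ⟨h1, h2, h3⟩ := H.2 b hb
        have hsb : s ≤ b := h3 s rfl
        refine ⟨Or.inr ?_, ?_, ?_⟩
        · rcases h1 with h1 | ⟨hbl, hbt⟩
          · rw [← Option.some.inj h1]
            exact ⟨List.mem_cons_self, hst⟩
          · exact ⟨List.mem_cons_of_mem _ hbl, hbt⟩
        · intro y hy hyt
          rcases List.mem_cons.1 hy with rfl | hyl
          · exact hsb
          · exact h2 y hyl hyt
        · intro a ha
          exact le_of_lt (lt_of_lt_of_le (hacc a ha) hsb)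
    · -- condition failed: accumulator unchanged
      have H := ih acc
      constructor
      · rw [H.1]
        constructor
        · rintro ⟨h1, h2⟩
          refine ⟨h1, ?_⟩
          intro y hy
          rcases List.mem_cons.1 hy with rfl | hyl
          · intro hyt
            rw [h1] at hif
            simp [hyt] at hif
          · exact h2 y hyl
        · rintro ⟨h1, h2⟩
          exact ⟨h1, fun y hy => h2 y (List.mem_cons_of_mem _ hy)⟩
      · intro b hb
        obtain ⟨h1, h2, h3⟩ := H.2 b hb
        refine ⟨?_, ?_, h3⟩
        · rcases h1 with h1 | ⟨hbl, hbt⟩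
          · exact Or.inl h1
          · exact Or.inr ⟨List.mem_cons_of_mem _ hbl, hbt⟩
        · intro y hy hyt
          rcases List.mem_cons.1 hy with rfl | hyl
          · -- y = s did not beat acc: acc = some a with ¬ a < y, and a ≤ b
            cases hacc : acc with
            | none => rw [hacc] at hif; simp [hyt] at hif
            | some a =>
              rw [hacc] at hif
              have hay : ¬ a < y := by
                intro hlt
                exact hif ⟨hyt, by simpa using hlt⟩
              exact le_trans (not_lt.1 hay) (h3 a hacc)
          · exact h2 y hyl hyt

-- ===== VERDICT (by name: the statement is the Claim_ definition above) =====
-- membership facts shared by the final assembly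
theorem pvInitInv (n : Nat) :
    ∀ j (hj : j < (PySem.Set.add PySem.Set.empty 0 :: List.replicate n (PySem.Set.empty : PySem.Set Int)).length) (s : Int),
      s ∈ (PySem.Set.add PySem.Set.empty 0 :: List.replicate n (PySem.Set.empty : PySem.Set Int))[j]
        ↔ s ∈ (pvCombos j ([] : List Int)).map (fun c => c.sum) := by
  intro j hj s
  cases j with
  | zero =>
    simp only [List.getElem_cons_zero, pvCombos]
    rw [PySem.Set.mem_add]
    simp [PySem.Set.empty]
  | succ j' =>
    have hj' : j' < n := by simpa using hj
    simp [List.getElem_cons_succ, List.getElem_replicate, pvCombos, PySem.Set.empty]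

theorem choose_best_sum_spec : Claim_equal_choose_best_sum := by
  intro t k ls _hdom hpre
  unfold Spec_choose_best_sum
  have hpre' : (0 : Int) ≤ k := hpre
  set n := k.toNat with hn
  have hk : k = (n : Int) := (Int.toNat_of_nonneg hpre').symm
  -- A's array
  have harr : (pvCombos n ls).foldl
      (fun arr c => if c.sum ≤ t then arr ++ [c.sum] else arr) []
        = ((pvCombos n ls).map (fun c => c.sum)).filter (fun s => decide (s ≤ t)) := by
    simpa using pvArrayA_eq t (pvCombos n ls) []
  -- B's dp
  have hinv := pvDpInv ls (PySem.Set.add PySem.Set.empty 0 :: List.replicate n (PySem.Set.empty : PySem.Set Int)) [] (pvInitInv n)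
  set dpF := ls.foldl (fun d x => pvStep x d) (PySem.Set.add PySem.Set.empty 0 :: List.replicate n (PySem.Set.empty : PySem.Set Int)) with hdpF
  have hlen : dpF.length = n + 1 := by simpa using hinv.1
  have hnlt : n < dpF.length := by omega
  have hget : PySem.List.pyGet? dpF k = some (dpF[n]'hnlt) := by
    rw [hk, PySem.List.pyGet?_natCast, List.getElem?_eq_getElem hnlt]
  have hmem : ∀ s : Int, s ∈ dpF[n]'hnlt ↔ s ∈ (pvCombos n ls).map (fun c => c.sum) := by
    intro s
    have := hinv.2 n (by omega) s
    simpa using this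
  -- B's early return: k > len(ls) iff the combination list is empty by length
  have hknn : ¬ k > (ls.length : Int) → n ≤ ls.length := by
    intro h
    omega
  by_cases hkl : k > (ls.length : Int)
  · -- k > len(ls): A's combination list is empty, B returns none up front
    have hcnil : pvCombos n ls = [] := by
      apply List.eq_nil_iff_forall_not_mem.2
      intro c hc
      rcases (pvMem_combos n ls c).1 hc with ⟨hs, hl⟩
      have := hs.length_le
      omega
    simp [choose_best_sum, choose_best_sum_alt, ← hn, hcnil, hkl]
  -- the two sides
  simp only [choose_best_sum, choose_best_sum_alt, ← hn, harr, ← hdpF, hget, if_neg hkl]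
  by_cases hA : ((pvCombos n ls).map (fun c => c.sum)).filter (fun s => decide (s ≤ t)) = []
  · -- no admissible sum: both none
    rw [hA]
    simp only [List.length_nil, gt_iff_lt, lt_irrefl, if_false]
    have hnone : ∀ y ∈ dpF[n]'hnlt, ¬ y ≤ t := by
      intro y hy hyt
      have : y ∈ ((pvCombos n ls).map (fun c => c.sum)).filter (fun s => decide (s ≤ t)) :=
        List.mem_filter.2 ⟨(hmem y).1 hy, by simpa using hyt⟩
      rw [hA] at this
      simp at this
    exact (((pvBestFold t (dpF[n]'hnlt) none).1).2 ⟨rfl, hnone⟩).symm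
  · -- some admissible sum: both the maximum
    set array := ((pvCombos n ls).map (fun c => c.sum)).filter (fun s => decide (s ≤ t)) with harrdef
    have hlenpos : array.length > 0 := List.length_pos_of_ne_nil hA
    simp only [hlenpos, if_pos]
    have harrmem : ∀ y : Int, y ∈ array ↔ (y ∈ (pvCombos n ls).map (fun c => c.sum) ∧ y ≤ t) := by
      intro y
      rw [harrdef, List.mem_filter]
      simp
    obtain ⟨m, hm⟩ : ∃ m, PySem.List.max? array (fun y => y) = some m := by
      cases h : PySem.List.max? array (fun y => y) with
      | none => exact absurd ((PySem.List.max?_eq_none_iff _ _).1 h) hA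
      | some m => exact ⟨m, rfl⟩
    have hmarr := PySem.List.max?_mem hm
    have hmax := PySem.List.max?_isMax hm
    have hmk : m ∈ dpF[n]'hnlt ∧ m ≤ t := by
      rcases (harrmem m).1 hmarr with ⟨h1, h2⟩
      exact ⟨(hmem m).2 h1, h2⟩
    obtain ⟨b, hb⟩ : ∃ b, (dpF[n]'hnlt).foldl (fun best s =>
        if s ≤ t && (match best with | none => true | some b => decide (b < s))
        then some s else best) none = some b := by
      cases h : (dpF[n]'hnlt).foldl (fun best s =>
          if s ≤ t && (match best with | none => true | some b => decide (b < s))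
          then some s else best) none with
      | none =>
        have := ((pvBestFold t (dpF[n]'hnlt) none).1).1 h
        exact absurd hmk.2 (this.2 m hmk.1)
      | some b => exact ⟨b, rfl⟩
    obtain ⟨h1, h2, _⟩ := (pvBestFold t (dpF[n]'hnlt) none).2 b hb
    have hbk : b ∈ dpF[n]'hnlt ∧ b ≤ t := by
      rcases h1 with h1 | h1
      · exact absurd h1 (by simp)
      · exact h1
    have hbarr : b ∈ array := (harrmem b).2 ⟨(hmem b).1 hbk.1, hbk.2⟩
    have hbm : b = m := le_antisymm (hmax b hbarr) (h2 m hmk.1 hmk.2)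
    rw [hm, hb, hbm]
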